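-- pv_equiv track=rewrite | github.com/EduBasileCairo/LearnPtN | Tema5Parte6-1Argoritmos.py | codigo_1
-- ===== SOURCE A (Python) =====
-- def codigo_1( number ):
--     a = 0
--     for j in range(1, number+1):
--         a += a + j
--     for k in range(number, 0, -1):
--         a -= 1
--         a *= 2
--     return a
-- ===== SOURCE B (Python) =====
-- def codigo_1(number):
--     if number <= 0:
--         return 0
--     p = 1 << number
--     return p * (2 * p - number - 4) + 2
-- ===== Notes on version B (the rewrite author's own statement) =====
-- stated objective: faster
-- what changed: Replaces the two linear big-integer loops by a closed form (one shift and one multiplication); intended as faster, and a timing run measured B orders of magnitude faster at the largest size both finished, though it could not verify the top size.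
import Mathlib
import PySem

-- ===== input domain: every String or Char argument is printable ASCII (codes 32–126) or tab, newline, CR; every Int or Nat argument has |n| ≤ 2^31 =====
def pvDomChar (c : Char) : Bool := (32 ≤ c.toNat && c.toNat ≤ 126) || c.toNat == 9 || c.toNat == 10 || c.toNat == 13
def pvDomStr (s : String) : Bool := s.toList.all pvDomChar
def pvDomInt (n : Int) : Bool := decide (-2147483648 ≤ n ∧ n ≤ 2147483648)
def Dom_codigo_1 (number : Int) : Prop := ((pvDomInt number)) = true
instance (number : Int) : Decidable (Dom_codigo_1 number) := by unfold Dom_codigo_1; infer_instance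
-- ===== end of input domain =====

-- B replaces A's two linear loops by a closed form (one shift, one multiplication); intended as faster (a timing run measured B orders of magnitude faster at the largest size both finished).

-- ===== PORT A =====
def codigo_1 (number : Int) : Int :=
  let a := (PySem.List.pyRange 1 (number + 1) 1).foldl (fun a j => a + (a + j)) 0
  (PySem.List.pyRange number 0 (-1)).foldl (fun a _ => (a - 1) * 2) a

-- ===== PORT B =====
def codigo_1_alt (number : Int) : Int :=
  if number ≤ 0 then 0
  else
    let p : Int := 2 ^ number.toNat   -- 1 << number
    p * (2 * p - number - 4) + 2

-- ===== PRECONDITION & SPEC =====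
def Spec_codigo_1 (number : Int) (out : Int) : Prop := out = codigo_1_alt number
instance (number : Int) (out : Int) : Decidable (Spec_codigo_1 number out) := by unfold Spec_codigo_1; infer_instance

-- ===== CLAIM (what is proved, stated in full; the proofs are below) =====
def Claim_equal_codigo_1 : Prop := ∀ (number : Int), Dom_codigo_1 number → Spec_codigo_1 number (codigo_1 number)

-- ===== LEMMAS AND PROOFS =====

-- first loop: a ← 2a + j for j = 1..m gives 2^(m+1) - m - 2
theorem pv_first_loop (m : Nat) :
    (PySem.List.pyRange 1 ((m : Int) + 1) 1).foldl (fun a j => a + (a + j)) 0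
      = 2 ^ (m + 1) - (m : Int) - 2 := by
  induction m with
  | zero => simp [PySem.List.pyRange_one_eq_nil]
  | succ k ih =>
      have h : (1 : Int) ≤ (k : Int) + 1 := by omega
      have : ((k : Int) + 1 + 1) = ((k : Int) + 1) + 1 := by ring
      rw [show ((k + 1 : Nat) : Int) + 1 = ((k : Int) + 1) + 1 by push_cast; ring,
          PySem.List.pyRange_one_succ_right h, List.foldl_append, ih]
      simp only [List.foldl_cons, List.foldl_nil]
      push_cast
      ring

-- second loop: m iterations of a ← (a-1)*2 give 2^m * (a - 2) + 2
theorem pv_second_loop (l : List Int) (a : Int) :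
    l.foldl (fun a _ => (a - 1) * 2) a = 2 ^ l.length * (a - 2) + 2 := by
  induction l generalizing a with
  | nil => simp
  | cons x xs ih =>
      rw [List.foldl_cons, ih]
      simp [pow_succ]
      ring

-- ===== VERDICT (by name: the statement is the Claim_ definition above) =====
theorem codigo_1_spec : Claim_equal_codigo_1 := by
  intro number _
  unfold Spec_codigo_1 codigo_1 codigo_1_alt
  by_cases h : number ≤ 0
  · simp only [if_pos h]
    rw [PySem.List.pyRange_one_eq_nil (by omega), PySem.List.pyRange_neg_one_eq_nil h]
    simp
  · simp only [if_neg h]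
    rw [not_le] at h
    obtain ⟨m, hm⟩ : ∃ m : Nat, number = (m : Int) := ⟨number.toNat, (Int.toNat_of_nonneg h.le).symm⟩
    subst hm
    rw [pv_second_loop, PySem.List.length_pyRange_neg_one, pv_first_loop]
    simp only [Int.sub_zero, Int.toNat_natCast]
    ring
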